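-- pv_equiv track=rewrite | github.com/the-this-pointer/resistor-network-calculator | resistor-calculator.py | append_index_to_repeats
-- ===== SOURCE A (Python) =====
-- def append_index_to_repeats(input_list):
--     # Dictionary to keep track of occurrences
--     occurrences = {}
--     result = []
--
--     for item in input_list:
--         if item in occurrences:
--             # Increment the count for the item
--             occurrences[item] += 1
--             # Append the item with its current index
--             result.append(f"{item}_{occurrences[item]}")
--         else:
--             # First occurrence of the item
--             occurrences[item] = 1
--             result.append(item)
--
--     return result
-- ===== SOURCE B (Python) =====
-- def append_index_to_repeats(input_list):
--     # Group the positions of each distinct value, emit one labeled (position, text)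
--     # pair per occurrence from each group, then sort the pairs back into input order.
--     positions = {}
--     for i, item in enumerate(input_list):
--         positions.setdefault(item, []).append(i)
--     labeled = []
--     for item, idxs in positions.items():
--         labeled.append((idxs[0], item))
--         for j, i in enumerate(idxs[1:], start=2):
--             labeled.append((i, f"{item}_{j}"))
--     labeled.sort(key=lambda t: t[0])
--     return [text for _, text in labeled]
-- ===== Notes on version B (the rewrite author's own statement) =====
-- stated objective: alternative
-- what changed: Instead of one left-to-right pass threading an occurrence counter, B groups the positions of each distinct value, emits a labeled (position, text) pair per occurrence group-by-group, then sorts the pairs by position to restore input order.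
import Mathlib
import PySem

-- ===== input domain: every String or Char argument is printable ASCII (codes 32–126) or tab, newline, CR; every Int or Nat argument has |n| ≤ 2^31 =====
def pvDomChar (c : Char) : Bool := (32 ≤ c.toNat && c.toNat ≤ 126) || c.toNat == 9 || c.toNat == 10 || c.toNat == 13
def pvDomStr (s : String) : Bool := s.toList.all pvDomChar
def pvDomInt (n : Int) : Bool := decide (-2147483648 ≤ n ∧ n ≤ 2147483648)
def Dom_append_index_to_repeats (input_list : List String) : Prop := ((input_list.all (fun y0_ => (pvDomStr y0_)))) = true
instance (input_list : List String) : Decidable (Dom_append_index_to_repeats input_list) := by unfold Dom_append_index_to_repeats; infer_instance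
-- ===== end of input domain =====

-- B replaces A's single pass with a running occurrence dictionary by a group-and-sort
-- strategy: group the positions of each distinct value, emit one labeled (position, text)
-- pair per occurrence group by group, then sort the pairs by position (alternative; not faster).

-- ===== PORT A =====
def append_index_to_repeats (input_list : List String) : List String :=
  (input_list.foldl
    (fun (st : PySem.Dict String Int × List String) item =>
      match st.1.get? item with
      | some n => (st.1.insert item (n + 1), st.2 ++ [item ++ "_" ++ PySem.Int.toStr (n + 1)])
      | none => (st.1.insert item 1, st.2 ++ [item]))
    (PySem.Dict.empty, [])).2

-- ===== PORT B =====
def append_index_to_repeats_alt (input_list : List String) : List String :=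
  let positions : PySem.Dict String (List Int) :=
    (PySem.List.enumerate input_list).foldl
      (fun d p => d.modify p.2 [] (fun l => l ++ [p.1])) PySem.Dict.empty
  let labeled : List (Int × String) :=
    positions.items.foldl
      (fun acc kv =>
        (PySem.List.enumerate (PySem.List.slice kv.2 (some 1) none) 2).foldl
          (fun acc2 q => acc2 ++ [(q.2, kv.1 ++ "_" ++ PySem.Int.toStr q.1)])
          (acc ++ [(PySem.List.pyGetD kv.2 0 0, kv.1)]))
      []
  (PySem.List.sorted labeled (fun t => t.1)).map (fun t => t.2)

-- ===== PRECONDITION & SPEC =====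
def Spec_append_index_to_repeats (input_list : List String) (out : List String) : Prop := out = append_index_to_repeats_alt input_list
instance (input_list : List String) (out : List String) : Decidable (Spec_append_index_to_repeats input_list out) := by unfold Spec_append_index_to_repeats; infer_instance

-- ===== CLAIM (what is proved, stated in full; the proofs are below) =====
def Claim_equal_append_index_to_repeats : Prop := ∀ (input_list : List String), Dom_append_index_to_repeats input_list → Spec_append_index_to_repeats input_list (append_index_to_repeats input_list)

-- ===== LEMMAS AND PROOFS =====

-- The text emitted for the (m+1)-st occurrence of c (m prior occurrences).
def pvLbl (c : String) (m : Nat) : String :=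
  if m = 0 then c else c ++ "_" ++ PySem.Int.toStr ((m : Int) + 1)

-- Reference form of A's loop: process xs given the already-seen prefix `seen`.
def pvGo (seen xs : List String) : List String :=
  match xs with
  | [] => []
  | x :: rest => pvLbl x (seen.count x) :: pvGo (seen ++ [x]) rest

-- Reference form of one group's block: label the pairs of one value's occurrence
-- group, entered after m prior occurrences.
def pvBlk (c : String) : Nat → List (Int × String) → List (Int × String)
  | _, [] => []
  | m, p :: rest => (p.1, pvLbl c m) :: pvBlk c (m + 1) rest

-- The common specification element: position p of the full list xs gets the label
-- determined by its prior-occurrence count.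
def pvF (xs : List String) (p : Int × String) : Int × String :=
  (p.1, pvLbl p.2 ((xs.take p.1.toNat).count p.2))

-- B's per-group block expression, as a function of one dict item.
def pvG (kv : String × List Int) : List (Int × String) :=
  (PySem.List.pyGetD kv.2 0 0, kv.1)
    :: (PySem.List.enumerate (kv.2.tail) 2).map
         (fun q => (q.2, kv.1 ++ "_" ++ PySem.Int.toStr q.1))

lemma pv_fold_aux (xs seen : List String) (occ : PySem.Dict String Int) (res : List String)
    (hocc : ∀ y, occ.get? y = if seen.count y = 0 then none else some (seen.count y : Int)) :
    (xs.foldl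
      (fun (st : PySem.Dict String Int × List String) item =>
        match st.1.get? item with
        | some n => (st.1.insert item (n + 1), st.2 ++ [item ++ "_" ++ PySem.Int.toStr (n + 1)])
        | none => (st.1.insert item 1, st.2 ++ [item]))
      (occ, res)).2 = res ++ pvGo seen xs := by
  induction xs generalizing seen occ res with
  | nil => simp [pvGo]
  | cons x rest ih =>
    have hx := hocc x
    by_cases h0 : seen.count x = 0
    · rw [if_pos h0] at hx
      rw [List.foldl_cons]
      simp only [hx]
      rw [ih (seen ++ [x]) _ _ ?_, pvGo]
      · simp [pvLbl, h0]
      · intro y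
        by_cases hy : y = x
        · subst hy
          rw [PySem.Dict.get?_insert_self]
          simp [List.count_append, h0]
        · rw [PySem.Dict.get?_insert_of_ne _ _ hy, hocc y]
          have : List.count y [x] = 0 := by
            simp [List.count_singleton]
            exact fun h => absurd h.symm hy
          simp [List.count_append, this]
    · rw [if_neg h0] at hx
      rw [List.foldl_cons]
      simp only [hx]
      rw [ih (seen ++ [x]) _ _ ?_, pvGo]
      · simp [pvLbl, h0]
      · intro y
        by_cases hy : y = x
        · subst hy
          rw [PySem.Dict.get?_insert_self]
          simp [List.count_append]
        · rw [PySem.Dict.get?_insert_of_ne _ _ hy, hocc y]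
          have : List.count y [x] = 0 := by
            simp [List.count_singleton]
            exact fun h => absurd h.symm hy
          simp [List.count_append, this]

lemma pv_go_eq_map (xs seen : List String) :
    pvGo seen xs
      = (PySem.List.enumerate xs (seen.length : Int)).map
          (fun p => pvLbl p.2 (((seen ++ xs).take p.1.toNat).count p.2)) := by
  induction xs generalizing seen with
  | nil => simp [pvGo, PySem.List.enumerate]
  | cons x rest ih =>
    rw [PySem.List.enumerate_cons, List.map_cons, pvGo]
    congr 1
    · simp [List.take_left']
    · have h := ih (seen ++ [x])
      have hlen : ((seen ++ [x]).length : Int) = (seen.length : Int) + 1 := by simp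
      rw [hlen, List.append_assoc] at h
      simpa using h

-- B's inner loop over idxs[1:] (enumerated from 2) is the tail of a pvBlk block.
lemma pv_inner_eq_blk (c : String) (rest : List (Int × String)) (m : Nat) :
    (PySem.List.enumerate (rest.map (fun p => p.1)) ((m : Int) + 2)).map
        (fun q => (q.2, c ++ "_" ++ PySem.Int.toStr q.1))
      = pvBlk c (m + 1) rest := by
  induction rest generalizing m with
  | nil => simp [pvBlk]
  | cons p r ih =>
    have htail : ((m : Int) + 2) + 1 = ((m + 1 : Nat) : Int) + 2 := by push_cast; ring
    have hlbl : pvLbl c (m + 1) = c ++ "_" ++ PySem.Int.toStr ((m : Int) + 2) := by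
      unfold pvLbl
      rw [if_neg (by omega), show (((m + 1 : Nat) : Int) + 1) = ((m : Int) + 2) from by push_cast; ring]
    rw [List.map_cons, PySem.List.enumerate_cons, List.map_cons, htail, ih (m + 1), pvBlk, hlbl]

-- B's whole per-group block, on a nonempty occurrence group.
lemma pv_block_eq_blk (c : String) (fl : List (Int × String)) (h : fl ≠ []) :
    pvG (c, fl.map (fun p => p.1)) = pvBlk c 0 fl := by
  match fl with
  | p :: rest =>
    rw [pvG, List.map_cons, pvBlk]
    congr 1
    · simp [PySem.List.pyGetD_zero_cons, pvLbl]
    · have h2 := pv_inner_eq_blk c rest 0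
      simpa using h2

-- A pvBlk block over the occurrences of c carries exactly the spec labels.
lemma pv_blk_eq_map (xs seen : List String) (c : String) :
    pvBlk c (seen.count c)
        ((PySem.List.enumerate xs (seen.length : Int)).filter (fun p => p.2 == c))
      = ((PySem.List.enumerate xs (seen.length : Int)).filter (fun p => p.2 == c)).map
          (pvF (seen ++ xs)) := by
  induction xs generalizing seen with
  | nil => simp [pvBlk, PySem.List.enumerate]
  | cons x rest ih =>
    rw [PySem.List.enumerate_cons, List.filter_cons]
    have hlen : ((seen ++ [x]).length : Int) = (seen.length : Int) + 1 := by simp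
    have h := ih (seen ++ [x])
    rw [hlen, List.append_assoc] at h
    simp only [List.singleton_append] at h
    by_cases hx : x = c
    · subst hx
      rw [if_pos (by simp)]
      rw [pvBlk]
      have hcnt : (seen ++ [x]).count x = seen.count x + 1 := by simp [List.count_append]
      rw [hcnt] at h
      rw [List.map_cons, h]
      congr 1
      simp [pvF, List.take_left']
    · rw [if_neg (by simpa using fun hh => hx hh)]
      have hcnt : (seen ++ [x]).count c = seen.count c := by
        simp [List.count_append, List.count_singleton]
        exact fun hh => absurd hh hx
      rw [hcnt] at h
      exact h

lemma pv_single_flatMap (p : Int × String) (cs : List String)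
    (hnd : cs.Nodup) (hm : p.2 ∈ cs) :
    cs.flatMap (fun c => if p.2 == c then [p] else []) = [p] := by
  induction cs with
  | nil => simp at hm
  | cons c0 rest ih =>
    rw [List.flatMap_cons]
    by_cases hc : p.2 = c0
    · rw [if_pos (by simp [hc])]
      have hnotin : p.2 ∉ rest := by
        subst hc
        exact (List.nodup_cons.mp hnd).1
      have hz : rest.flatMap (fun c => if p.2 == c then [p] else []) = [] := by
        apply List.flatMap_eq_nil_iff.mpr
        intro c hcm
        rw [if_neg (by simp only [beq_iff_eq]; exact fun hh => hnotin (hh ▸ hcm))]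
      rw [hz]
      simp
    · rw [if_neg (by simp [hc])]
      have hm' : p.2 ∈ rest := by
        rcases List.mem_cons.mp hm with h | h
        · exact absurd h hc
        · exact h
      rw [List.nil_append]
      exact ih (List.nodup_cons.mp hnd).2 hm'

-- Concatenating the per-value filters over the distinct values is a permutation of l.
lemma pv_partition_perm (l : List (Int × String)) (cs : List String)
    (hnd : cs.Nodup) (hall : ∀ p ∈ l, p.2 ∈ cs) :
    (cs.flatMap (fun c => l.filter (fun p => p.2 == c))).Perm l := by
  induction l with
  | nil => simp
  | cons p t ih =>
    have hsplit : (fun c => (p :: t).filter (fun q => q.2 == c))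
        = fun c => (if p.2 == c then [p] else []) ++ t.filter (fun q => q.2 == c) := by
      funext c
      rw [List.filter_cons]
      by_cases h : p.2 = c
      · simp [h]
      · rw [if_neg (by simp [h]), if_neg (by simp [h]), List.nil_append]
    rw [hsplit]
    have hperm := (List.flatMap_append_perm cs (fun c => if p.2 == c then [p] else [])
      (fun c => t.filter (fun q => q.2 == c))).symm
    refine hperm.trans ?_
    rw [pv_single_flatMap p cs hnd (hall p (by simp))]
    have ht := ih (fun q hq => hall q (by simp [hq]))
    simpa using ht.cons p

-- B's outer loop appends one pvG block per dict item.
lemma pv_outer (items : List (String × List Int)) (acc : List (Int × String)) :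
    items.foldl
      (fun acc kv =>
        (PySem.List.enumerate (PySem.List.slice kv.2 (some 1) none) 2).foldl
          (fun acc2 q => acc2 ++ [(q.2, kv.1 ++ "_" ++ PySem.Int.toStr q.1)])
          (acc ++ [(PySem.List.pyGetD kv.2 0 0, kv.1)]))
      acc = acc ++ items.flatMap pvG := by
  induction items generalizing acc with
  | nil => simp
  | cons kv rest ih =>
    rw [List.foldl_cons, PySem.List.foldl_append_singleton_eq_map, PySem.List.slice_from_one,
      ih, List.flatMap_cons, pvG]
    simp

-- ===== VERDICT (by name: the statement is the Claim_ definition above) =====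
theorem append_index_to_repeats_spec : Claim_equal_append_index_to_repeats := by
  intro xs _
  show append_index_to_repeats xs = append_index_to_repeats_alt xs
  -- A's side: the running-counter pass produces the spec labels in input order.
  rw [append_index_to_repeats,
    pv_fold_aux xs [] _ _ (fun y => by simp [PySem.Dict.get?_empty])]
  have hA := pv_go_eq_map xs []
  simp only [List.length_nil, Nat.cast_zero, List.nil_append] at hA
  rw [List.nil_append, hA]
  -- B's side.
  rw [append_index_to_repeats_alt]
  set D := (PySem.List.enumerate xs).foldl
      (fun d p => d.modify p.2 [] (fun l => l ++ [p.1])) PySem.Dict.empty with hD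
  have hkeys : D.keys = PySem.Set.ofList xs := by
    rw [hD, PySem.Dict.keys_foldl_modify_key (PySem.List.enumerate xs) (fun p => p.2)
      ([] : List Int) (fun _ p => fun l => l ++ [p.1]) PySem.Dict.empty]
    simp only [PySem.Dict.keys_empty, PySem.List.map_snd_enumerate]
    exact PySem.Set.update_nil_left xs
  have hnodup : D.keys.Nodup := by
    rw [hkeys]; exact PySem.Set.nodup_ofList xs
  have hgetD : ∀ c, D.getD c [] =
      ((PySem.List.enumerate xs).filter (fun p => p.2 == c)).map (fun p => p.1) := by
    intro c
    have hswap : D = ((PySem.List.enumerate xs).map Prod.swap).foldl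
        (fun d p => d.modify p.1 [] (fun l => l ++ [p.2])) PySem.Dict.empty := by
      rw [List.foldl_map]
      rfl
    rw [hswap, PySem.Dict.getD_foldl_modify_append]
    simp [List.filter_map, List.map_map, Function.comp_def, Prod.swap]
  have hitems : D.items = (PySem.Set.ofList xs).map
      (fun c => (c, ((PySem.List.enumerate xs).filter (fun p => p.2 == c)).map (fun p => p.1))) := by
    rw [PySem.Dict.items_eq_map_keys D hnodup ([] : List Int), hkeys]
    exact List.map_congr_left (fun c _ => by rw [hgetD c])
  rw [pv_outer, List.nil_append, hitems, List.flatMap_map]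
  have hblocks : (PySem.Set.ofList xs).flatMap
      (fun c => pvG (c, ((PySem.List.enumerate xs).filter (fun p => p.2 == c)).map (fun p => p.1)))
      = (PySem.Set.ofList xs).flatMap
          (fun c => ((PySem.List.enumerate xs).filter (fun p => p.2 == c)).map (pvF xs)) := by
    refine List.flatMap_congr ?_
    intro c hc
    have hcx : c ∈ xs := (PySem.Set.mem_ofList xs c).mp hc
    have hne : (PySem.List.enumerate xs).filter (fun p => p.2 == c) ≠ [] := by
      have : c ∈ (PySem.List.enumerate xs).map (fun p => p.2) := by
        rw [PySem.List.map_snd_enumerate]; exact hcx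
      rcases List.mem_map.mp this with ⟨p, hp, hpc⟩
      exact List.ne_nil_of_mem (List.mem_filter.mpr ⟨hp, by simp [hpc]⟩)
    rw [pv_block_eq_blk c _ hne]
    have h := pv_blk_eq_map xs [] c
    simpa using h
  rw [hblocks, ← List.map_flatMap]
  have hperm : ((PySem.Set.ofList xs).flatMap
      (fun c => (PySem.List.enumerate xs).filter (fun p => p.2 == c))).Perm
      (PySem.List.enumerate xs) := by
    refine pv_partition_perm _ _ (PySem.Set.nodup_ofList xs) ?_
    intro p hp
    refine (PySem.Set.mem_ofList xs p.2).mpr ?_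
    rcases (PySem.List.mem_enumerate_iff xs 0 p).mp hp with ⟨k, hk, rfl⟩
    simp
  have hsorted : PySem.List.sorted
      (((PySem.Set.ofList xs).flatMap
        (fun c => (PySem.List.enumerate xs).filter (fun p => p.2 == c))).map (pvF xs))
      (fun t => t.1)
      = (PySem.List.enumerate xs).map (pvF xs) := by
    refine PySem.List.sorted_eq_of_perm_of_pairwise_lt _ _ _ (hperm.map (pvF xs)).symm ?_
    exact List.Pairwise.map _ (fun a b h => h) (PySem.List.pairwise_lt_enumerate xs 0)
  rw [hsorted, List.map_map]
  rfl
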